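-- pv_equiv track=rewrite | github.com/JoeySoprano420/ModuSynthX | Grammar.py | compile_to_vm_bytecode
-- ===== SOURCE A (Python) =====
-- vm_bytecode = {
--     "MODSET": "MSX_01",       # Apply modifier
--     "WRITEOUT": "MSX_02",     # Output to system object
--     "ALLOCREG": "MSX_03",     # Allocate virtual memory/register
--     "LINK": "MSX_04",         # Link contexts/modules
--     "FLOWCMP": "MSX_05",      # Compress execution flow
--     "RELEASE": "MSX_06",      # Release flow
--     "PING": "MSX_07",         # Ping for error correction
--     "SIFT": "MSX_08",         # Sift memory garbage
--     "INFER": "MSX_09",        # Inference-based execution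
--     "TRIGGER": "MSX_0A",      # Trigger module
--     "PAUSE": "MSX_0B",        # Pause
--     "END": "MSX_FF"           # End script
-- }
--
-- def compile_to_vm_bytecode(code_lines):
--     compiled_vm = []
--     for line in code_lines:
--         if "write" in line:
--             compiled_vm.append((vm_bytecode["MODSET"], "quick"))
--             compiled_vm.append((vm_bytecode["WRITEOUT"], "@console", "'Hello, ModuSynthX World!'"))
--         elif "ping" in line:
--             compiled_vm.append((vm_bytecode["PING"], "smart"))
--         elif "sift.purge" in line:
--             compiled_vm.append((vm_bytecode["SIFT"], "$TempTokens", "5_interactions"))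
--         elif "flow.compress" in line:
--             compiled_vm.append((vm_bytecode["FLOWCMP"], "idle"))
--         elif "trigger.release" in line:
--             compiled_vm.append((vm_bytecode["RELEASE"], "interaction-heavy", "$ResponseMem"))
--         elif "infer.methods" in line:
--             compiled_vm.append((vm_bytecode["INFER"], "$AssistantCore", "undefined_calls"))
--         elif "pause" in line:
--             compiled_vm.append((vm_bytecode["MODSET"], "briefly"))
--             compiled_vm.append((vm_bytecode["PAUSE"],))
--     compiled_vm.append((vm_bytecode["END"],))
--     return compiled_vm
-- ===== SOURCE B (Python) =====
-- _KEYS = ["write", "ping", "sift.purge", "flow.compress",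
--          "trigger.release", "infer.methods", "pause"]
--
-- _OUT = [
--     [("MSX_01", "quick"), ("MSX_02", "@console", "'Hello, ModuSynthX World!'")],
--     [("MSX_07", "smart")],
--     [("MSX_08", "$TempTokens", "5_interactions")],
--     [("MSX_05", "idle")],
--     [("MSX_06", "interaction-heavy", "$ResponseMem")],
--     [("MSX_09", "$AssistantCore", "undefined_calls")],
--     [("MSX_01", "briefly"), ("MSX_0B",)],
--     [],  # tag 7: no rule matched
-- ]
--
-- def compile_to_vm_bytecode(code_lines):
--     # Pass structure: rule-major.  Sweep the rules from last to first, each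
--     # sweep re-tagging every line that contains that rule's keyword; since
--     # earlier rules are applied later they overwrite, so a line ends up
--     # tagged with its FIRST matching rule.  A final pass expands tags.
--     tags = [7] * len(code_lines)
--     for r in range(len(_KEYS) - 1, -1, -1):
--         key = _KEYS[r]
--         for i, line in enumerate(code_lines):
--             if key in line:
--                 tags[i] = r
--     out = []
--     for t in tags:
--         out.extend(_OUT[t])
--     out.append(("MSX_FF",))
--     return out
-- ===== Notes on version B (the rewrite author's own statement) =====
-- stated objective: alternative
-- what changed: Replaced the line-major elif chain by a rule-major algorithm: seven staged passes over all lines, sweeping the rules in reverse order to build a per-line tag array (earlier rules overwrite later ones, yielding first-match semantics), then a final pass expands tags into bytecode tuples and appends END.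
import Mathlib
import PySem

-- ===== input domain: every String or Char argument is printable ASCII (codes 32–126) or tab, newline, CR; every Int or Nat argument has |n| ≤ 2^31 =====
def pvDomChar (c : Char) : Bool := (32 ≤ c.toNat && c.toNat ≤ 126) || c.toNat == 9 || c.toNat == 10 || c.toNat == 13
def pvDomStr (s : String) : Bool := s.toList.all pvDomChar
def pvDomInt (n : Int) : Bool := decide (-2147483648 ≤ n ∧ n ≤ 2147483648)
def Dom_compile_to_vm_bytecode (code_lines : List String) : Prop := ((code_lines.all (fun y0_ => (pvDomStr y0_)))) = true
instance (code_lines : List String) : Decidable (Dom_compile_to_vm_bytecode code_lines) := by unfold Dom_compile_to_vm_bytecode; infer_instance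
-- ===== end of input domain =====

-- B replaces A's line-major elif chain by a rule-major algorithm: staged reverse sweeps over all lines build a per-line tag array, then tags are expanded to tuples (alternative; same cost).


-- ===== PORT A =====
def compile_to_vm_bytecode (code_lines : List String) : List (List String) :=
  let compiled_vm := code_lines.foldl (fun compiled_vm line =>
    if PySem.Str.isIn "write" line then
      compiled_vm ++ [["MSX_01", "quick"]] ++ [["MSX_02", "@console", "'Hello, ModuSynthX World!'"]]
    else if PySem.Str.isIn "ping" line then
      compiled_vm ++ [["MSX_07", "smart"]]
    else if PySem.Str.isIn "sift.purge" line then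
      compiled_vm ++ [["MSX_08", "$TempTokens", "5_interactions"]]
    else if PySem.Str.isIn "flow.compress" line then
      compiled_vm ++ [["MSX_05", "idle"]]
    else if PySem.Str.isIn "trigger.release" line then
      compiled_vm ++ [["MSX_06", "interaction-heavy", "$ResponseMem"]]
    else if PySem.Str.isIn "infer.methods" line then
      compiled_vm ++ [["MSX_09", "$AssistantCore", "undefined_calls"]]
    else if PySem.Str.isIn "pause" line then
      compiled_vm ++ [["MSX_01", "briefly"]] ++ [["MSX_0B"]]
    else compiled_vm) []
  compiled_vm ++ [["MSX_FF"]]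

-- ===== PORT B =====
-- B: rule-major staged passes — reverse sweeps over all lines build a tag array, then tags expand to tuples
def pvKeys : List String :=
  ["write", "ping", "sift.purge", "flow.compress", "trigger.release", "infer.methods", "pause"]

def pvOut : List (List (List String)) :=
  [[["MSX_01", "quick"], ["MSX_02", "@console", "'Hello, ModuSynthX World!'"]],
   [["MSX_07", "smart"]],
   [["MSX_08", "$TempTokens", "5_interactions"]],
   [["MSX_05", "idle"]],
   [["MSX_06", "interaction-heavy", "$ResponseMem"]],
   [["MSX_09", "$AssistantCore", "undefined_calls"]],
   [["MSX_01", "briefly"], ["MSX_0B"]],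
   []]  -- tag 7: no rule matched

def compile_to_vm_bytecode_alt (code_lines : List String) : List (List String) :=
  -- tags = [7]*len; for r in range(6,-1,-1): retag every line containing pvKeys[r]
  let tags := (List.range 7).reverse.foldl (fun tags r =>
      (tags.zip code_lines).map (fun p =>
        if PySem.Str.isIn (pvKeys.getD r "") p.2 then r else p.1))
    (List.replicate code_lines.length 7)
  let out := tags.foldl (fun out t => out ++ pvOut.getD t []) []
  out ++ [["MSX_FF"]]

-- ===== PRECONDITION & SPEC =====
def Spec_compile_to_vm_bytecode (code_lines : List String) (out : List (List String)) : Prop := out = compile_to_vm_bytecode_alt code_lines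
instance (code_lines : List String) (out : List (List String)) : Decidable (Spec_compile_to_vm_bytecode code_lines out) := by unfold Spec_compile_to_vm_bytecode; infer_instance

-- ===== CLAIM (what is proved, stated in full; the proofs are below) =====
def Claim_equal_compile_to_vm_bytecode : Prop := ∀ (code_lines : List String), Dom_compile_to_vm_bytecode code_lines → Spec_compile_to_vm_bytecode code_lines (compile_to_vm_bytecode code_lines)

-- ===== LEMMAS AND PROOFS =====

-- pointwise view of one sweep: zipping a mapped list with its source and mapping is a map
lemma zip_map_step (g : Nat → String → Nat) (f : String → Nat) :
    ∀ (ls : List String),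
      ((ls.map f).zip ls).map (fun p => g p.1 p.2) = ls.map (fun l => g (f l) l) := by
  intro ls; induction ls with
  | nil => rfl
  | cons x xs ih => simp [ih]

-- the whole rule-major fold over tag arrays equals a per-line fold over the rules
lemma foldzip :
    ∀ (rs : List Nat) (ls : List String) (f : String → Nat),
      rs.foldl (fun tags r => (tags.zip ls).map
          (fun p => if PySem.Str.isIn (pvKeys.getD r "") p.2 then r else p.1)) (ls.map f)
      = ls.map (fun line => rs.foldl
          (fun t r => if PySem.Str.isIn (pvKeys.getD r "") line then r else t) (f line)) := by
  intro rs; induction rs with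
  | nil => intro ls f; rfl
  | cons r rs ih =>
    intro ls f
    simp only [List.foldl_cons]
    rw [zip_map_step (fun t line => if PySem.Str.isIn (pvKeys.getD r "") line then r else t) f ls,
        ih ls (fun l => if PySem.Str.isIn (pvKeys.getD r "") l then r else f l)]

-- the tag a line ends with, and its expansion
def pvTagOf (line : String) : Nat :=
  (List.range 7).reverse.foldl
    (fun t r => if PySem.Str.isIn (pvKeys.getD r "") line then r else t) 7

-- per line, B's tag expansion equals A's branch chunk
lemma chunk_eq (line : String) :
    pvOut.getD (pvTagOf line) [] =
    (if PySem.Str.isIn "write" line then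
      [["MSX_01", "quick"], ["MSX_02", "@console", "'Hello, ModuSynthX World!'"]]
    else if PySem.Str.isIn "ping" line then [["MSX_07", "smart"]]
    else if PySem.Str.isIn "sift.purge" line then [["MSX_08", "$TempTokens", "5_interactions"]]
    else if PySem.Str.isIn "flow.compress" line then [["MSX_05", "idle"]]
    else if PySem.Str.isIn "trigger.release" line then [["MSX_06", "interaction-heavy", "$ResponseMem"]]
    else if PySem.Str.isIn "infer.methods" line then [["MSX_09", "$AssistantCore", "undefined_calls"]]
    else if PySem.Str.isIn "pause" line then [["MSX_01", "briefly"], ["MSX_0B"]]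
    else ([] : List (List String))) := by
  unfold pvTagOf
  simp only [show (List.range 7).reverse = [6,5,4,3,2,1,0] by decide, List.foldl_cons,
    List.foldl_nil,
    show pvKeys.getD 0 "" = "write" from by decide,
    show pvKeys.getD 1 "" = "ping" from by decide,
    show pvKeys.getD 2 "" = "sift.purge" from by decide,
    show pvKeys.getD 3 "" = "flow.compress" from by decide,
    show pvKeys.getD 4 "" = "trigger.release" from by decide,
    show pvKeys.getD 5 "" = "infer.methods" from by decide,
    show pvKeys.getD 6 "" = "pause" from by decide]
  generalize PySem.Str.isIn "write" line = b0
  generalize PySem.Str.isIn "ping" line = b1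
  generalize PySem.Str.isIn "sift.purge" line = b2
  generalize PySem.Str.isIn "flow.compress" line = b3
  generalize PySem.Str.isIn "trigger.release" line = b4
  generalize PySem.Str.isIn "infer.methods" line = b5
  generalize PySem.Str.isIn "pause" line = b6
  cases b0 <;> cases b1 <;> cases b2 <;> cases b3 <;> cases b4 <;> cases b5 <;> cases b6 <;> rfl

-- ===== VERDICT (by name: the statement is the Claim_ definition above) =====
theorem compile_to_vm_bytecode_spec : Claim_equal_compile_to_vm_bytecode := by
  intro code_lines _
  unfold Spec_compile_to_vm_bytecode compile_to_vm_bytecode compile_to_vm_bytecode_alt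
  show (code_lines.foldl (fun compiled_vm line =>
    if PySem.Str.isIn "write" line then
      compiled_vm ++ [["MSX_01", "quick"]] ++ [["MSX_02", "@console", "'Hello, ModuSynthX World!'"]]
    else if PySem.Str.isIn "ping" line then compiled_vm ++ [["MSX_07", "smart"]]
    else if PySem.Str.isIn "sift.purge" line then compiled_vm ++ [["MSX_08", "$TempTokens", "5_interactions"]]
    else if PySem.Str.isIn "flow.compress" line then compiled_vm ++ [["MSX_05", "idle"]]
    else if PySem.Str.isIn "trigger.release" line then compiled_vm ++ [["MSX_06", "interaction-heavy", "$ResponseMem"]]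
    else if PySem.Str.isIn "infer.methods" line then compiled_vm ++ [["MSX_09", "$AssistantCore", "undefined_calls"]]
    else if PySem.Str.isIn "pause" line then compiled_vm ++ [["MSX_01", "briefly"]] ++ [["MSX_0B"]]
    else compiled_vm) []) ++ [["MSX_FF"]]
    = (((List.range 7).reverse.foldl (fun tags r =>
        (tags.zip code_lines).map (fun p =>
          if PySem.Str.isIn (pvKeys.getD r "") p.2 then r else p.1))
      (List.replicate code_lines.length 7)).foldl
        (fun out t => out ++ pvOut.getD t []) []) ++ [["MSX_FF"]]
  -- B: reduce the tag construction to a per-line map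
  have hrep : List.replicate code_lines.length 7 = code_lines.map (fun _ => 7) := by
    simp [List.map_const']
  rw [hrep, foldzip (List.range 7).reverse code_lines (fun _ => 7)]
  rw [show (fun (out : List (List String)) t => out ++ pvOut.getD t []) =
        fun (out : List (List String)) t => out ++ (fun t => pvOut.getD t []) t from rfl,
      PySem.List.foldl_append_eq_flatMap]
  -- A: reduce the accumulator fold to a flatMap of per-line chunks
  have hA : (fun (compiled_vm : List (List String)) line =>
      if PySem.Str.isIn "write" line then
        compiled_vm ++ [["MSX_01", "quick"]] ++ [["MSX_02", "@console", "'Hello, ModuSynthX World!'"]]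
      else if PySem.Str.isIn "ping" line then compiled_vm ++ [["MSX_07", "smart"]]
      else if PySem.Str.isIn "sift.purge" line then compiled_vm ++ [["MSX_08", "$TempTokens", "5_interactions"]]
      else if PySem.Str.isIn "flow.compress" line then compiled_vm ++ [["MSX_05", "idle"]]
      else if PySem.Str.isIn "trigger.release" line then compiled_vm ++ [["MSX_06", "interaction-heavy", "$ResponseMem"]]
      else if PySem.Str.isIn "infer.methods" line then compiled_vm ++ [["MSX_09", "$AssistantCore", "undefined_calls"]]
      else if PySem.Str.isIn "pause" line then compiled_vm ++ [["MSX_01", "briefly"]] ++ [["MSX_0B"]]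
      else compiled_vm)
      = fun (acc : List (List String)) line => acc ++ pvOut.getD (pvTagOf line) [] := by
    funext acc line
    rw [chunk_eq]
    split_ifs <;> simp
  rw [hA, PySem.List.foldl_append_eq_flatMap]
  simp [List.flatMap_map, pvTagOf]
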